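-- pv_equiv track=rewrite | github.com/DavidAkaFunky/ProgFundamentals2019 | Capítulo 4/4-6.py | num_para_seq_cod
-- ===== SOURCE A (Python) =====
-- def explode (n):
--     if not isinstance(n, int):
--         raise ValueError ("Explode: elemento nao inteiro")
--     tuplo = ()
--     while n > 0:
--         digito = n % 10
--         tuplo = (digito,) + tuplo
--         n = n // 10
--     return tuplo
--
-- def num_para_seq_cod (n):
--     if not isinstance(n, int):
--         raise ValueError ("Numero nao inteiro")
--     num_novo = 0
--     i = 0
--     while n > 0:
--         digito = n % 10
--         if digito % 2 == 0:
--             if digito == 8: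
--                 digito = 0
--             else:
--                 digito += 2
--         else:
--             if digito == 1:
--                 digito = 9
--             else:
--                 digito -= 2
--         num_novo += digito * (10 ** i)
--         n = n // 10
--         i += 1
--     return explode (num_novo)
-- ===== SOURCE B (Python) =====
-- _MAP = {0: 2, 1: 9, 2: 4, 3: 1, 4: 6, 5: 3, 6: 8, 7: 5, 8: 0, 9: 7}
--
-- def num_para_seq_cod(n):
--     if not isinstance(n, int):
--         raise ValueError("Numero nao inteiro")
--     digits = []
--     while n > 0:
--         digits.append(_MAP[n % 10])
--         n //= 10
--     digits.reverse()
--     i = 0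
--     while i < len(digits) and digits[i] == 0:
--         i += 1
--     return tuple(digits[i:])
-- ===== Notes on version B (the rewrite author's own statement) =====
-- stated objective: simpler
-- what changed: B maps the digits via a lookup table into a list and strips leading zeros explicitly, instead of A's rebuilding an integer from the mapped digits and re-exploding it with a second tuple-prepend loop.
import Mathlib
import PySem

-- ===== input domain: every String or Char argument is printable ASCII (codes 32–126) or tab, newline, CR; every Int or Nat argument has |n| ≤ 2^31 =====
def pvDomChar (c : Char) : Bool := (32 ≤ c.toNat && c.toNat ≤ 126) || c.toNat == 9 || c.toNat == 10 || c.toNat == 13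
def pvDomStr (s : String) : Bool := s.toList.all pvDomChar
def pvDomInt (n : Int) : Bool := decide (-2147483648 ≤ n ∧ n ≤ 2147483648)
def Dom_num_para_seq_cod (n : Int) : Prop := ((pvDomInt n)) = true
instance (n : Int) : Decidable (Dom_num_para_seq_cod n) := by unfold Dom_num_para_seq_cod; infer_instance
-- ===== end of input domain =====

-- B replaces A's rebuild-an-integer-then-explode round trip by a direct digit-list pass:
-- map each digit via a table, reverse, strip leading zeros (objective: simpler).

-- ===== PORT A =====
-- explode's while loop: tuplo = (digito,) + tuplo, n //= 10
def pvExplodeGo (n : Int) (acc : List Int) : List Int :=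
  if h : n > 0 then
    pvExplodeGo (PySem.Int.floordiv n 10) (PySem.Int.mod n 10 :: acc)
  else acc
termination_by n.toNat
decreasing_by
  rw [PySem.Int.floordiv_eq_ediv_of_pos (by norm_num)]
  omega

def pvExplode (n : Int) : List Int := pvExplodeGo n []

-- A's if-chain transforming one digit
def pvMapA (d : Int) : Int :=
  if PySem.Int.mod d 2 = 0 then (if d = 8 then 0 else d + 2)
  else (if d = 1 then 9 else d - 2)

-- A's main while loop: state (num_novo, i)
def pvAGo (n num : Int) (i : Nat) : Int :=
  if h : n > 0 then
    pvAGo (PySem.Int.floordiv n 10) (num + pvMapA (PySem.Int.mod n 10) * 10 ^ i) (i + 1)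
  else num
termination_by n.toNat
decreasing_by
  rw [PySem.Int.floordiv_eq_ediv_of_pos (by norm_num)]
  omega

def num_para_seq_cod (n : Int) : List Int := pvExplode (pvAGo n 0 0)

-- ===== PORT B =====
def pvMapDict : PySem.Dict Int Int :=
  PySem.Dict.ofList [(0, 2), (1, 9), (2, 4), (3, 1), (4, 6), (5, 3), (6, 8), (7, 5), (8, 0), (9, 7)]

-- B's while loop: digits.append(_MAP[n % 10]); n //= 10
def pvBGo (n : Int) (acc : List Int) : List Int :=
  if h : n > 0 then
    pvBGo (PySem.Int.floordiv n 10) (acc ++ [PySem.Dict.getD pvMapDict (PySem.Int.mod n 10) 0])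
  else acc
termination_by n.toNat
decreasing_by
  rw [PySem.Int.floordiv_eq_ediv_of_pos (by norm_num)]
  omega

-- reverse, then the index loop stripping leading zeros + tuple(digits[i:]) = dropWhile
def num_para_seq_cod_alt (n : Int) : List Int :=
  ((pvBGo n []).reverse).dropWhile (fun d => d == 0)

-- ===== PRECONDITION & SPEC =====
def Spec_num_para_seq_cod (n : Int) (out : List Int) : Prop := out = num_para_seq_cod_alt n
instance (n : Int) (out : List Int) : Decidable (Spec_num_para_seq_cod n out) := by unfold Spec_num_para_seq_cod; infer_instance

-- ===== CLAIM (what is proved, stated in full; the proofs are below) =====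
def Claim_equal_num_para_seq_cod : Prop := ∀ (n : Int), Dom_num_para_seq_cod n → Spec_num_para_seq_cod n (num_para_seq_cod n)

-- ===== LEMMAS AND PROOFS =====

-- the mapped digits of n, least-significant first
def pvMdig (n : Int) : List Int :=
  if h : n > 0 then pvMapA (PySem.Int.mod n 10) :: pvMdig (PySem.Int.floordiv n 10) else []
termination_by n.toNat
decreasing_by
  rw [PySem.Int.floordiv_eq_ediv_of_pos (by norm_num)]
  omega

-- the unmapped digits of m, most-significant first
def pvPdig (m : Int) : List Int :=
  if h : m > 0 then pvPdig (PySem.Int.floordiv m 10) ++ [PySem.Int.mod m 10] else []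
termination_by m.toNat
decreasing_by
  rw [PySem.Int.floordiv_eq_ediv_of_pos (by norm_num)]
  omega

def pvFromD (L : List Int) : Int := L.foldr (fun d a => d + 10 * a) 0

lemma pvMapA_dict (d : Int) (h0 : 0 ≤ d) (h9 : d < 10) :
    PySem.Dict.getD pvMapDict d 0 = pvMapA d := by
  interval_cases d <;> decide

lemma pvMapA_range (d : Int) (h0 : 0 ≤ d) (h9 : d < 10) :
    0 ≤ pvMapA d ∧ pvMapA d < 10 := by
  interval_cases d <;> decide

lemma pvMdig_range (n : Int) : ∀ d ∈ pvMdig n, 0 ≤ d ∧ d < 10 := by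
  induction n using pvMdig.induct with
  | case1 n h ih =>
    rw [pvMdig, dif_pos h]
    intro d hd
    rcases List.mem_cons.mp hd with rfl | hd
    · exact pvMapA_range _ (PySem.Int.mod_nonneg _ (by norm_num)) (PySem.Int.mod_lt _ (by norm_num))
    · exact ih d hd
  | case2 n h => rw [pvMdig, dif_neg h]; simp

lemma pvBGo_eq (n : Int) : ∀ acc, pvBGo n acc = acc ++ pvMdig n := by
  induction n using pvMdig.induct with
  | case1 n h ih =>
    intro acc
    rw [pvBGo, dif_pos h, pvMdig, dif_pos h, ih,
      pvMapA_dict _ (PySem.Int.mod_nonneg _ (by norm_num)) (PySem.Int.mod_lt _ (by norm_num))]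
    simp
  | case2 n h => intro acc; rw [pvBGo, dif_neg h, pvMdig, dif_neg h]; simp

lemma pvAGo_eq (n : Int) : ∀ num i, pvAGo n num i = num + pvFromD (pvMdig n) * 10 ^ i := by
  induction n using pvMdig.induct with
  | case1 n h ih =>
    intro num i
    rw [pvAGo, dif_pos h, pvMdig, dif_pos h, ih]
    simp only [pvFromD, List.foldr]
    ring
  | case2 n h => intro num i; rw [pvAGo, dif_neg h, pvMdig, dif_neg h]; simp [pvFromD]

lemma pvExplodeGo_eq (m : Int) : ∀ acc, pvExplodeGo m acc = pvPdig m ++ acc := by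
  induction m using pvPdig.induct with
  | case1 m h ih =>
    intro acc
    rw [pvExplodeGo, dif_pos h, pvPdig, dif_pos h, ih]
    simp
  | case2 m h => intro acc; rw [pvExplodeGo, dif_neg h, pvPdig, dif_neg h]; simp

lemma pvFromD_nonneg (L : List Int) (hL : ∀ d ∈ L, 0 ≤ d ∧ d < 10) : 0 ≤ pvFromD L := by
  induction L with
  | nil => simp [pvFromD]
  | cons d L ih =>
    have hd := hL d (List.mem_cons_self ..)
    have h2 := ih (fun x hx => hL x (List.mem_cons_of_mem _ hx))
    simp only [pvFromD, List.foldr] at *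
    nlinarith

lemma pvPdig_ne_nil (m : Int) (h : 0 < m) : pvPdig m ≠ [] := by
  rw [pvPdig, dif_pos h]
  simp

lemma pvPdig_step (d m : Int) (h0 : 0 ≤ d) (h9 : d < 10) (hm : 0 < m) :
    pvPdig (d + 10 * m) = pvPdig m ++ [d] := by
  have hpos : 0 < d + 10 * m := by omega
  rw [pvPdig, dif_pos hpos]
  have hdiv : PySem.Int.floordiv (d + 10 * m) 10 = m := by
    rw [PySem.Int.floordiv_eq_ediv_of_pos (by norm_num)]; omega
  have hmod : PySem.Int.mod (d + 10 * m) 10 = d := by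
    rw [PySem.Int.mod_eq_emod_of_pos (by norm_num)]; omega
  rw [hdiv, hmod]

lemma pvPdig_zero : pvPdig 0 = [] := by rw [pvPdig]; simp

lemma pvPdig_small (d : Int) (h0 : 0 ≤ d) (h9 : d < 10) :
    pvPdig d = if d = 0 then [] else [d] := by
  by_cases hd : d = 0
  · subst hd; simp [pvPdig_zero]
  · have hpos : 0 < d := by omega
    rw [if_neg hd, pvPdig, dif_pos hpos]
    have h1 : PySem.Int.floordiv d 10 = 0 := by
      rw [PySem.Int.floordiv_eq_ediv_of_pos (by norm_num)]; omega
    have h2 : PySem.Int.mod d 10 = d := by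
      rw [PySem.Int.mod_eq_emod_of_pos (by norm_num)]; omega
    rw [h1, h2, pvPdig_zero]; simp

-- key lemma: exploding the rebuilt integer = the reversed digit list with leading zeros stripped
lemma pvPdig_fromD (L : List Int) (hL : ∀ d ∈ L, 0 ≤ d ∧ d < 10) :
    pvPdig (pvFromD L) = L.reverse.dropWhile (fun d => d == 0) := by
  induction L with
  | nil => rw [pvFromD]; simp [pvPdig]
  | cons d L ih =>
    have hd := hL d (List.mem_cons_self ..)
    have hL' : ∀ x ∈ L, 0 ≤ x ∧ x < 10 := fun x hx => hL x (List.mem_cons_of_mem _ hx)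
    have hm := pvFromD_nonneg L hL'
    have hcons : pvFromD (d :: L) = d + 10 * pvFromD L := by simp [pvFromD]
    rw [hcons, List.reverse_cons, List.dropWhile_append]
    rcases lt_or_eq_of_le hm with hpos | hzero
    · rw [pvPdig_step d _ hd.1 hd.2 hpos, ih hL']
      have hne : ¬ (L.reverse.dropWhile (fun d => d == 0)).isEmpty = true := by
        rw [← ih hL']
        simpa [List.isEmpty_iff] using pvPdig_ne_nil _ hpos
      simp [hne]
    · have hdrop : L.reverse.dropWhile (fun d => d == 0) = [] := by
        rw [← ih hL', ← hzero]; exact pvPdig_zero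
      rw [← hzero]
      simp only [hdrop, List.isEmpty_nil, if_true]
      rw [mul_zero, add_zero, pvPdig_small d hd.1 hd.2]
      by_cases hd0 : d = 0
      · subst hd0; simp [List.dropWhile]
      · have hfd : (d == 0) = false := beq_eq_false_iff_ne.mpr hd0
        simp [List.dropWhile, hfd, hd0]

-- ===== VERDICT (by name: the statement is the Claim_ definition above) =====
theorem num_para_seq_cod_spec : Claim_equal_num_para_seq_cod := by
  intro n _
  show num_para_seq_cod n = num_para_seq_cod_alt n
  rw [num_para_seq_cod, num_para_seq_cod_alt, pvExplode, pvExplodeGo_eq, pvAGo_eq,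
    pvBGo_eq, List.append_nil, List.nil_append, pow_zero, mul_one, zero_add,
    pvPdig_fromD _ (pvMdig_range n)]
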